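-- pv_equiv track=rewrite | github.com/SystemicVoid/H-Neurons | scripts/characterize_swing.py | classify_swing_subtypes
-- ===== SOURCE A (Python) =====
-- def classify_swing_subtypes(
--     trajectories: dict[str, list[bool]], swing_ids: list[str]
-- ) -> dict[str, str]:
--     """Classify swing samples into R→C, C→R, or non-monotonic."""
--     subtypes: dict[str, str] = {}
--     for sid in swing_ids:
--         traj = trajectories[sid]
--         first = traj[0]
--         last = traj[-1]
--         # Check monotonicity: once it switches, does it stay?
--         is_monotonic = True
--         for i in range(1, len(traj)):
--             if traj[i] != traj[i - 1]:
--                 # Found a transition; check remaining are same as traj[i]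
--                 if any(t != traj[i] for t in traj[i + 1 :]):
--                     is_monotonic = False
--                 break
--
--         if not is_monotonic:
--             subtypes[sid] = "non-monotonic"
--         elif not first and last:
--             subtypes[sid] = "R→C"  # Resistant → Compliant (knowledge override)
--         elif first and not last:
--             subtypes[sid] = "C→R"  # Compliant → Resistant (uncertainty resolution)
--         else:
--             # Monotonic transition but same start/end — shouldn't happen for swing
--             subtypes[sid] = "non-monotonic"
--     return subtypes
-- ===== SOURCE B (Python) =====
-- def classify_swing_subtypes(
--     trajectories: dict[str, list[bool]], swing_ids: list[str]
-- ) -> dict[str, str]: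
--     """Classify swing samples into R->C, C->R, or non-monotonic.
--
--     A trajectory is a clean swing exactly when it has exactly one adjacent
--     transition; the final value then determines the direction.
--     """
--     def subtype(traj: list[bool]) -> str:
--         n_trans = sum(1 for x, y in zip(traj, traj[1:]) if x != y)
--         if n_trans == 1:
--             return "R→C" if traj[-1] else "C→R"
--         return "non-monotonic"
--
--     return {sid: subtype(trajectories[sid]) for sid in swing_ids}
-- ===== Notes on version B (the rewrite author's own statement) =====
-- stated objective: simpler
-- what changed: Replaces A's break-early monotonicity scan with its nested any() over the tail slice, plus a four-way branch on first/last, by a single aggregate count of adjacent transitions: exactly one transition means a clean swing and the final value alone determines the direction.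
import Mathlib
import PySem

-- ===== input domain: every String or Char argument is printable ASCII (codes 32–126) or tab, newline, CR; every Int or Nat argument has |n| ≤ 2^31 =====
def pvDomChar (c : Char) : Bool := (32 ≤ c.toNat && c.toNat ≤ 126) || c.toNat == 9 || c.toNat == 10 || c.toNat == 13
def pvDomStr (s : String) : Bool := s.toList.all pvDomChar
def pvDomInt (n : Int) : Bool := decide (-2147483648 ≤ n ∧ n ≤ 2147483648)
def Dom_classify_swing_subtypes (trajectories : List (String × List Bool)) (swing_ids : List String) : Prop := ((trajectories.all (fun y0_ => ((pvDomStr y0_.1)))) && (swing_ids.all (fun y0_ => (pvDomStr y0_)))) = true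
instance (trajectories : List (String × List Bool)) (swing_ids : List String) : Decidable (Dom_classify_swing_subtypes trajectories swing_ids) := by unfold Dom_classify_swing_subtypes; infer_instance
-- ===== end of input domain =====

-- B replaces A's break-early scan with a nested `any` by a single aggregate count of adjacent
-- transitions (exactly one transition ⇔ clean swing; the final value gives the direction);
-- objective: simpler.

-- ===== PORT A =====
-- A's inner monotonicity loop `for i in range(1, len(traj)): … break` as recursion on the
-- index i; the in-range reads traj[i], traj[i-1] are getD (exact: i is in range), and the
-- slice traj[i+1:] with nonnegative start is List.drop (exact).
def pvAMonoLoop (traj : List Bool) (i : Nat) : Bool :=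
  if i < traj.length then
    if traj.getD i false != traj.getD (i - 1) false then
      !((traj.drop (i + 1)).any (fun t => t != traj.getD i false))
    else pvAMonoLoop traj (i + 1)
  else true
termination_by traj.length - i

-- A's loop body for one sid's trajectory (traj[0]/traj[-1] via pyGet?; some under Pre_)
def pvAClassify (traj : List Bool) : String :=
  let first := (PySem.List.pyGet? traj 0).getD false
  let last := (PySem.List.pyGet? traj (-1)).getD false
  let is_monotonic := pvAMonoLoop traj 1
  if !is_monotonic then "non-monotonic"
  else if !first && last then "R→C"
  else if first && !last then "C→R"
  else "non-monotonic"

def classify_swing_subtypes (trajectories : List (String × List Bool)) (swing_ids : List String) : List (String × String) :=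
  (swing_ids.foldl (fun subtypes sid =>
      let traj := ((PySem.Dict.mk trajectories).get? sid).getD []
      subtypes.insert sid (pvAClassify traj))
    (PySem.Dict.empty : PySem.Dict String String)).items

-- ===== PORT B =====
-- B's helper: the 0/1-sum over zip(traj, traj[1:]) is List.countP; classify by the count
-- and the final value.
def pvBSubtype (traj : List Bool) : String :=
  let n_trans := (traj.zip (traj.drop 1)).countP (fun p => p.1 != p.2)
  if n_trans == 1 then
    if (PySem.List.pyGet? traj (-1)).getD false then "R→C" else "C→R"
  else "non-monotonic"

def classify_swing_subtypes_alt (trajectories : List (String × List Bool)) (swing_ids : List String) : List (String × String) :=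
  (swing_ids.foldl (fun d sid =>
      d.insert sid (pvBSubtype (((PySem.Dict.mk trajectories).get? sid).getD [])))
    (PySem.Dict.empty : PySem.Dict String String)).items

-- ===== PRECONDITION & SPEC =====
-- Pre_ excludes exactly the inputs on which Python A raises: a KeyError when some swing id is
-- not a key of trajectories, or an IndexError (traj[0]/traj[-1]) when its trajectory is empty.
def Pre_classify_swing_subtypes (trajectories : List (String × List Bool)) (swing_ids : List String) : Prop :=
  ∀ sid ∈ swing_ids, ∃ t, (PySem.Dict.mk trajectories).get? sid = some t ∧ t ≠ []
instance (trajectories : List (String × List Bool)) (swing_ids : List String) : Decidable (Pre_classify_swing_subtypes trajectories swing_ids) := by unfold Pre_classify_swing_subtypes; infer_instance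
def pvWitness_classify_swing_subtypes : (List (String × List Bool)) × List String :=
  ([("a", [false, true]), ("b", [true])], ["a", "b"])
def Spec_classify_swing_subtypes (trajectories : List (String × List Bool)) (swing_ids : List String) (out : List (String × String)) : Prop := out = classify_swing_subtypes_alt trajectories swing_ids
instance (trajectories : List (String × List Bool)) (swing_ids : List String) (out : List (String × String)) : Decidable (Spec_classify_swing_subtypes trajectories swing_ids out) := by unfold Spec_classify_swing_subtypes; infer_instance

-- ===== CLAIM (what is proved, stated in full; the proofs are below) =====
def Claim_equal_classify_swing_subtypes : Prop := ∀ (trajectories : List (String × List Bool)) (swing_ids : List String), Dom_classify_swing_subtypes trajectories swing_ids → Pre_classify_swing_subtypes trajectories swing_ids → Spec_classify_swing_subtypes trajectories swing_ids (classify_swing_subtypes trajectories swing_ids)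

-- ===== LEMMAS AND PROOFS =====

def pvCnt (l : List Bool) : Nat := (l.zip l.tail).countP (fun p => p.1 != p.2)

lemma pvCnt_cons_cons (a b : Bool) (r : List Bool) :
    pvCnt (a :: b :: r) = (if (a != b) = true then 1 else 0) + pvCnt (b :: r) := by
  by_cases h : (a != b) = true <;> simp [pvCnt, h] <;> omega

lemma pvCnt_zero_iff (b : Bool) (r : List Bool) :
    pvCnt (b :: r) = 0 ↔ r.all (fun t => t == b) := by
  induction r generalizing b with
  | nil => simp [pvCnt]
  | cons c r ih =>
    rw [pvCnt_cons_cons]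
    by_cases h : c = b
    · subst h; simp [ih]
    · have hb : (b != c) = true := by simp [bne_iff_ne]; exact fun e => h e.symm
      simp [hb, h]

lemma pvCnt_zero_getLast (a : Bool) (r : List Bool) (h : pvCnt (a :: r) = 0) :
    (a :: r).getLast? = some a := by
  induction r generalizing a with
  | nil => simp
  | cons b r ih =>
    rw [pvCnt_cons_cons] at h
    have hab : a = b := by
      by_cases hc : a = b
      · exact hc
      · rw [if_pos (by simpa [bne_iff_ne] using hc)] at h; omega
    subst hab
    rw [List.getLast?_cons_cons]
    exact ih a (by simpa using h)

lemma pvCnt_one_getLast (a : Bool) (r : List Bool) (h : pvCnt (a :: r) = 1) :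
    (a :: r).getLast? = some (!a) := by
  induction r generalizing a with
  | nil => simp [pvCnt] at h
  | cons b r ih =>
    rw [pvCnt_cons_cons] at h
    by_cases hab : a = b
    · subst hab
      rw [if_neg (by simp)] at h
      rw [List.getLast?_cons_cons]
      exact ih a (by simpa using h)
    · have hb : b = !a := by cases a <;> cases b <;> simp_all
      rw [if_pos (by simpa [bne_iff_ne] using hab)] at h
      rw [List.getLast?_cons_cons, pvCnt_zero_getLast b r (by omega), hb]

lemma pvAMonoLoop_eq (traj : List Bool) (i : Nat) (hi : 1 ≤ i) :
    pvAMonoLoop traj i = decide (pvCnt (traj.drop (i - 1)) ≤ 1) := by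
  induction i using pvAMonoLoop.induct traj with
  | case1 i hlt hne =>
    rw [pvAMonoLoop]
    simp only [hlt, if_pos, hne]
    have hi1 : i - 1 < traj.length := by omega
    have hdrop : traj.drop (i - 1) = traj[i - 1] :: traj.drop (i - 1 + 1) :=
      List.drop_eq_getElem_cons hi1
    have hdrop2 : traj.drop i = traj[i] :: traj.drop (i + 1) :=
      List.drop_eq_getElem_cons hlt
    rw [show i - 1 + 1 = i by omega] at hdrop
    rw [hdrop, hdrop2, pvCnt_cons_cons]
    have hgi : traj.getD i false = traj[i] := List.getD_eq_getElem traj false hlt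
    have hgi1 : traj.getD (i - 1) false = traj[i - 1] := List.getD_eq_getElem traj false hi1
    rw [hgi, hgi1] at hne
    have hne' : (traj[i - 1] != traj[i]) = true := by
      cases h1 : traj[i-1] <;> cases h2 : traj[i] <;> simp_all
    rw [if_pos hne']
    have h2 : decide (1 + pvCnt (traj[i] :: traj.drop (i + 1)) ≤ 1)
        = decide (pvCnt (traj[i] :: traj.drop (i + 1)) = 0) := by
      by_cases h : pvCnt (traj[i] :: traj.drop (i + 1)) = 0 <;> simp [h] <;> omega
    rw [h2]
    have h3 : decide (pvCnt (traj[i] :: traj.drop (i + 1)) = 0)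
        = (traj.drop (i + 1)).all (fun t => t == traj[i]) := by
      by_cases h : pvCnt (traj[i] :: traj.drop (i + 1)) = 0
      · have hall := (pvCnt_zero_iff traj[i] (traj.drop (i + 1))).mp h
        rw [h, hall]
        simp
      · have h' := (not_iff_not.mpr (pvCnt_zero_iff traj[i] (traj.drop (i + 1)))).mp h
        simp only [h, decide_false]
        exact (Bool.eq_false_iff.mpr h').symm
    rw [h3, List.all_eq_not_any_not]
    simp [List.getD_eq_getElem?_getD, List.getElem?_eq_getElem hlt, bne]
  | case2 i hlt heq ih =>
    rw [pvAMonoLoop]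
    simp only [hlt, if_pos, heq]
    rw [ih (by omega)]
    have hi1 : i - 1 < traj.length := by omega
    have hdrop : traj.drop (i - 1) = traj[i - 1] :: traj.drop (i - 1 + 1) :=
      List.drop_eq_getElem_cons hi1
    have hdrop2 : traj.drop i = traj[i] :: traj.drop (i + 1) :=
      List.drop_eq_getElem_cons hlt
    rw [show i - 1 + 1 = i by omega] at hdrop
    have hgi : traj.getD i false = traj[i] := List.getD_eq_getElem traj false hlt
    have hgi1 : traj.getD (i - 1) false = traj[i - 1] := List.getD_eq_getElem traj false hi1
    rw [hgi, hgi1] at heq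
    have heq' : traj[i - 1] = traj[i] := by
      cases h1 : traj[i-1] <;> cases h2 : traj[i] <;> simp_all
    rw [show i + 1 - 1 = i by omega, hdrop, hdrop2, pvCnt_cons_cons, heq']
    simp
  | case3 i hge =>
    rw [pvAMonoLoop]
    simp only [hge]
    have hlen : (traj.drop (i - 1)).length ≤ 1 := by
      simp only [List.length_drop]; omega
    rcases hd : traj.drop (i - 1) with _ | ⟨a, _ | ⟨b, r⟩⟩
    · simp [pvCnt]
    · simp [pvCnt]
    · rw [hd] at hlen; simp at hlen

lemma pvClassify_eq (traj : List Bool) (h : traj ≠ []) :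
    pvAClassify traj = pvBSubtype traj := by
  obtain ⟨a, r, rfl⟩ := List.exists_cons_of_ne_nil h
  unfold pvAClassify pvBSubtype
  rw [pvAMonoLoop_eq _ 1 le_rfl]
  simp only [Nat.sub_self, List.drop_zero, List.drop_one]
  have hcnt : (((a :: r).zip (a :: r).tail).countP (fun p => p.1 != p.2)) = pvCnt (a :: r) := rfl
  rw [hcnt, PySem.List.pyGet?_neg_one]
  have hfirst : (PySem.List.pyGet? (a :: r) 0).getD false = a := by
    rw [PySem.List.pyGet?_zero_cons]; rfl
  rw [hfirst]
  rcases hc : pvCnt (a :: r) with _ | n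
  · have hl := pvCnt_zero_getLast a r hc
    rw [hl]
    cases a <;> simp
  · rcases n with _ | n
    · have hl := pvCnt_one_getLast a r hc
      rw [hl]
      cases a <;> simp
    · simp

-- ===== VERDICT (by name: the statement is the Claim_ definition above) =====
theorem classify_swing_subtypes_spec : Claim_equal_classify_swing_subtypes := by
  intro trajectories swing_ids _hdom hpre
  unfold Spec_classify_swing_subtypes
  unfold classify_swing_subtypes classify_swing_subtypes_alt
  congr 1
  apply PySem.List.foldl_congr_mem
  intro acc sid hmem
  obtain ⟨t, ht, hne⟩ := hpre sid hmem
  simp only [ht, Option.getD_some]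
  rw [pvClassify_eq t hne]
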